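-- pv_equiv track=rewrite | github.com/tanhongze/pyvmodule | vmodule/__init__.py | clog2
-- ===== SOURCE A (Python) =====
-- def clog2(x):
--     if x<=1:
--         return 0
--     c = 2
--     n = 1
--     while c<x:
--         c =c<<1
--         n+=1
--     return n
-- ===== SOURCE B (Python) =====
-- def clog2(x):
--     return 0 if x <= 1 else (x - 1).bit_length()
-- ===== Notes on version B (the rewrite author's own statement) =====
-- stated objective: simpler
-- what changed: Replaces the doubling while-loop with a closed form: for inputs above one, ceil(log2(x)) is computed as the bit length of x-1, removing the loop entirely.
import Mathlib
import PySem

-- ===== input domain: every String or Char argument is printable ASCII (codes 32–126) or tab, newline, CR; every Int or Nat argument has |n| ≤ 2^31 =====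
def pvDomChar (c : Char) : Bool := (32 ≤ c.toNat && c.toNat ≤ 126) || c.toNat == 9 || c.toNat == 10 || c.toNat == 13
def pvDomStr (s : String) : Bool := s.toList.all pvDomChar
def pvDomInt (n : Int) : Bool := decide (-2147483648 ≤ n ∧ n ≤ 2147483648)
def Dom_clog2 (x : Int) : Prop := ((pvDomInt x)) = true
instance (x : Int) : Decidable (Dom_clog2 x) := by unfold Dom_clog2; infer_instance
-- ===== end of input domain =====

-- B replaces A's doubling while-loop with the closed form (x-1).bit_length() for x > 1 (simpler, loop-free).

-- ===== PORT A =====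
-- the while loop of A; `c << 1` is `c * 2` (exact for ints); hc records that c stays positive (loop invariant, for termination only)
def clog2Loop (x c n : Int) (hc : 0 < c) : Int :=
  if c < x then clog2Loop x (c * 2) (n + 1) (by omega) else n
termination_by (x - c).toNat
decreasing_by omega

def clog2 (x : Int) : Int :=
  if x ≤ 1 then 0 else clog2Loop x 2 1 (by norm_num)

-- ===== PORT B =====
def clog2_alt (x : Int) : Int :=
  if x ≤ 1 then 0 else ((PySem.Int.bitLength (x - 1) : Nat) : Int)

-- ===== PRECONDITION & SPEC =====
def Spec_clog2 (x : Int) (out : Int) : Prop := out = clog2_alt x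
instance (x : Int) (out : Int) : Decidable (Spec_clog2 x out) := by unfold Spec_clog2; infer_instance

-- ===== CLAIM (what is proved, stated in full; the proofs are below) =====
def Claim_equal_clog2 : Prop := ∀ (x : Int), Dom_clog2 x → Spec_clog2 x (clog2 x)

-- ===== LEMMAS AND PROOFS =====

-- on exit of the loop (2^(m-1) < x ≤ 2^m) the counter m is exactly bit_length (x-1)
lemma clog2_exit_eq (x : Int) (hx : 2 ≤ x) (m : Nat) (hm : 1 ≤ m)
    (hlo : (2 : Int) ^ (m - 1) < x) (hhi : x ≤ 2 ^ m) :
    m = PySem.Int.bitLength (x - 1) := by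
  set s := PySem.Int.bitLength (x - 1) with hs
  have hne : x - 1 ≠ 0 := by omega
  have h1 : (x - 1).natAbs < 2 ^ s := PySem.Int.lt_two_pow_bitLength (x - 1)
  have h2 : 2 ^ (s - 1) ≤ (x - 1).natAbs := PySem.Int.two_pow_bitLength_le (x - 1) hne
  have hNA : ((x - 1).natAbs : Int) = x - 1 := Int.natAbs_of_nonneg (by omega)
  -- x ≤ 2^m gives natAbs (x-1) < 2^m
  have hup : (x - 1).natAbs < 2 ^ m := by
    have : ((x - 1).natAbs : Int) < ((2 ^ m : Nat) : Int) := by rw [hNA]; push_cast; omega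
    exact_mod_cast this
  -- 2^(m-1) < x gives 2^(m-1) ≤ natAbs (x-1)
  have hdn : 2 ^ (m - 1) ≤ (x - 1).natAbs := by
    have : ((2 ^ (m - 1) : Nat) : Int) ≤ ((x - 1).natAbs : Int) := by rw [hNA]; push_cast; omega
    exact_mod_cast this
  have hs1 : 1 ≤ s := by
    by_contra h
    have : s = 0 := by omega
    simp [this] at h1
    omega
  have hms : m - 1 < s := by
    have := lt_of_le_of_lt hdn h1
    exact (Nat.pow_lt_pow_iff_right (by norm_num : 1 < 2)).mp this
  have hsm : s - 1 < m := by
    have := lt_of_le_of_lt h2 hup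
    exact (Nat.pow_lt_pow_iff_right (by norm_num : 1 < 2)).mp this
  omega

-- loop invariant: starting at c = 2^m with 2^(m-1) < x, the loop returns bit_length (x-1)
lemma clog2Loop_eq (x : Int) (hx : 2 ≤ x) :
    ∀ (k m : Nat), 1 ≤ m → PySem.Int.bitLength (x - 1) - m ≤ k →
      (2 : Int) ^ (m - 1) < x →
      ∀ (hc : 0 < (2 : Int) ^ m),
        clog2Loop x (2 ^ m) (m : Int) hc = (PySem.Int.bitLength (x - 1) : Int) := by
  intro k
  induction k with
  | zero =>
    intro m hm hk hlo hc
    rw [clog2Loop]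
    split
    · -- c < x: then m < bitLength (x-1), contradicting hk
      rename_i h
      exfalso
      have hne : x - 1 ≠ 0 := by omega
      have h1 : (x - 1).natAbs < 2 ^ PySem.Int.bitLength (x - 1) :=
        PySem.Int.lt_two_pow_bitLength (x - 1)
      have hdn : 2 ^ m ≤ (x - 1).natAbs := by
        have : ((2 ^ m : Nat) : Int) ≤ ((x - 1).natAbs : Int) := by
          rw [Int.natAbs_of_nonneg (by omega : (0:Int) ≤ x - 1)]; push_cast; omega
        exact_mod_cast this
      have := (Nat.pow_lt_pow_iff_right (by norm_num : 1 < 2)).mp (lt_of_le_of_lt hdn h1)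
      omega
    · rename_i h
      exact_mod_cast clog2_exit_eq x hx m hm hlo (by omega)
  | succ k ih =>
    intro m hm hk hlo hc
    rw [clog2Loop]
    split
    · rename_i h
      have hc' : (0 : Int) < 2 ^ (m + 1) := by positivity
      have := ih (m + 1) (by omega)
        (by
          have hne : x - 1 ≠ 0 := by omega
          have h1 : (x - 1).natAbs < 2 ^ PySem.Int.bitLength (x - 1) :=
            PySem.Int.lt_two_pow_bitLength (x - 1)
          have hdn : 2 ^ m ≤ (x - 1).natAbs := by
            have : ((2 ^ m : Nat) : Int) ≤ ((x - 1).natAbs : Int) := by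
              rw [Int.natAbs_of_nonneg (by omega : (0:Int) ≤ x - 1)]; push_cast; omega
            exact_mod_cast this
          have := (Nat.pow_lt_pow_iff_right (by norm_num : 1 < 2)).mp (lt_of_le_of_lt hdn h1)
          omega)
        (by simpa using h) hc'
      have hcast : ((m : Int) + 1) = ((m + 1 : Nat) : Int) := by push_cast; ring
      have hpow : (2 : Int) ^ m * 2 = 2 ^ (m + 1) := by ring
      simp only [hcast, hpow]
      exact this
    · rename_i h
      exact_mod_cast clog2_exit_eq x hx m hm hlo (by omega)

-- ===== VERDICT (by name: the statement is the Claim_ definition above) =====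
theorem clog2_spec : Claim_equal_clog2 := by
  intro x _
  unfold Spec_clog2 clog2 clog2_alt
  split
  · rfl
  · rename_i h
    have hx : 2 ≤ x := by omega
    have := clog2Loop_eq x hx (PySem.Int.bitLength (x - 1)) 1 (le_refl 1) (by omega)
      (by norm_num; omega) (by norm_num)
    simpa using this
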